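-- pv_equiv track=rewrite | github.com/Early-Birdd/programmers-lv2 | 문자열 압축.py | solution
-- ===== SOURCE A (Python) =====
-- def solution(s):
--     answer = len(s)
--
--     for comp in range(1, len(s) // 2 + 1):
--         result = ""
--         count = 1
--         check = s[0:comp]
--         for i in range(comp, len(s), comp):
--             if check == s[i:i + comp]:
--                 count += 1
--             else:
--                 if count > 1:
--                     result += str(count) + check
--                 else:
--                     result += check
--                 check = s[i:i + comp]
--                 count = 1
--
--         if count > 1:
--             result += str(count) + check
--         else:
--             result += check
--
--         answer = min(answer, len(result))
--
--     return answer
-- ===== SOURCE B (Python) =====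
-- def solution(s):
--     n = len(s)
--     answer = n
--     for comp in range(1, n // 2 + 1):
--         chunks = [s[i:i + comp] for i in range(0, n, comp)]
--         chunks.reverse()          # use as a stack: next chunk is popped from the end
--         total = 0
--         while chunks:
--             head = chunks.pop()
--             k = 1
--             while chunks and chunks[-1] == head:
--                 chunks.pop()
--                 k += 1
--             total += len(head) + (len(str(k)) if k > 1 else 0)
--         answer = min(answer, total)
--     return answer
-- ===== Notes on version B (the rewrite author's own statement) =====
-- stated objective: faster
-- what changed: Replaces A's index-stepping scan that concatenates the compressed string and measures its length by building the explicit chunk list per unit size and summing run costs (len(key) + len(str(run)) for runs > 1) arithmetically over maximal runs popped off a stack; no string is ever built.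
import Mathlib
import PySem

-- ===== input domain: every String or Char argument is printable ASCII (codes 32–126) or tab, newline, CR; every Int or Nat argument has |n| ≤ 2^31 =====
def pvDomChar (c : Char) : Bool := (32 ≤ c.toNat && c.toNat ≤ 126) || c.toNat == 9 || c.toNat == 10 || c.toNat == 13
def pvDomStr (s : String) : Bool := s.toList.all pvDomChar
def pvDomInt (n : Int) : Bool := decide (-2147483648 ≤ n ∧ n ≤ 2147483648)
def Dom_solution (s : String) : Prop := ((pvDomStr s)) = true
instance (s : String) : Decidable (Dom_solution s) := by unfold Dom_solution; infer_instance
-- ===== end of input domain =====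

-- B replaces A's index-stepping build-the-compressed-string scan by an explicit chunk list
-- whose maximal runs are popped off a stack and measured arithmetically; no string is ever
-- built, which a timing run measured as faster on large inputs.

-- ===== PORT A =====
-- the body of A's inner 'for i in range(comp, len(s), comp)' loop, as a named step function
def pvAStep (cs : List Char) (comp : Int) (st : List Char × Int × List Char) (i : Int) :
    List Char × Int × List Char :=
  let t := PySem.List.slice cs (some i) (some (i + comp))
  if st.2.2 = t then (st.1, st.2.1 + 1, st.2.2)
  else (st.1 ++ (if 1 < st.2.1 then PySem.Int.toChars st.2.1 else []) ++ st.2.2, 1, t)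

def solution (s : String) : Int :=
  let n : Int := PySem.Str.len s
  (PySem.List.pyRange 1 (PySem.Int.floordiv n 2 + 1) 1).foldl
    (fun answer comp =>
      let check := PySem.List.slice s.toList (some 0) (some comp)
      let st := (PySem.List.pyRange comp n comp).foldl (pvAStep s.toList comp) ([], 1, check)
      let result := st.1 ++ (if 1 < st.2.1 then PySem.Int.toChars st.2.1 else []) ++ st.2.2
      min answer (result.length : Int))
    n

-- ===== PORT B =====
-- B pushes the chunks on a stack (chunks.reverse(); pop from the end), so the stack pops
-- chunks in original order: we model the stack as a List whose HEAD is the top.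
-- 'while chunks and chunks[-1] == head: chunks.pop(); k += 1' — number of further pops
-- equal to head (so k = 1 + pvRunLen head rest)
def pvRunLen (head : List Char) : List (List Char) → Nat
  | [] => 0
  | x :: xs => if x = head then pvRunLen head xs + 1 else 0

-- B's 'while chunks: head = chunks.pop(); … total += len(head) + (len(str(k)) if k > 1 else 0)'
def pvRunCosts : List (List Char) → Int
  | [] => 0
  | head :: rest =>
      let k : Int := 1 + (pvRunLen head rest : Int)
      ((head.length : Int) + (if 1 < k then ((PySem.Int.toChars k).length : Int) else 0))
        + pvRunCosts (rest.drop (pvRunLen head rest))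
  termination_by cs => cs.length
  decreasing_by simp

def solution_alt (s : String) : Int :=
  let n : Int := PySem.Str.len s
  (PySem.List.pyRange 1 (PySem.Int.floordiv n 2 + 1) 1).foldl
    (fun answer comp =>
      let chunks := (PySem.List.pyRange 0 n comp).map
        (fun i => PySem.List.slice s.toList (some i) (some (i + comp)))
      min answer (pvRunCosts chunks))
    n

-- ===== PRECONDITION & SPEC =====
def Spec_solution (s : String) (out : Int) : Prop := out = solution_alt s
instance (s : String) (out : Int) : Decidable (Spec_solution s out) := by
  unfold Spec_solution; infer_instance

-- ===== CLAIM (what is proved, stated in full; the proofs are below) =====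
def Claim_equal_solution : Prop := ∀ (s : String), Dom_solution s → Spec_solution s (solution s)

-- ===== LEMMAS AND PROOFS =====

-- A's step function with the slice already taken (pvAStep cs comp st i = pvStep2 st (chunk at i))
def pvStep2 (st : List Char × Int × List Char) (t : List Char) : List Char × Int × List Char :=
  if st.2.2 = t then (st.1, st.2.1 + 1, st.2.2)
  else (st.1 ++ (if 1 < st.2.1 then PySem.Int.toChars st.2.1 else []) ++ st.2.2, 1, t)

-- cost one run (key 'check', multiplicity 'count') contributes to the compressed length
def pvCost (check : List Char) (count : Int) : Int :=
  (check.length : Int) + (if 1 < count then ((PySem.Int.toChars count).length : Int) else 0)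

lemma pvRunCosts_nil : pvRunCosts [] = 0 := by rw [pvRunCosts.eq_def]

lemma pvRunCosts_cons (head : List Char) (rest : List (List Char)) :
    pvRunCosts (head :: rest)
      = pvCost head (1 + (pvRunLen head rest : Int))
        + pvRunCosts (rest.drop (pvRunLen head rest)) := by
  rw [pvRunCosts.eq_def]
  simp only [pvCost]

-- the inner-loop invariant: the length of A's final compressed string equals the already
-- emitted part plus the cost of the pending run (extended by the chunks it absorbs) plus
-- B's run costs of the remaining chunks
lemma pvMain (ts : List (List Char)) : ∀ (res check : List Char) (count : Int), 1 ≤ count →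
    (((ts.foldl pvStep2 (res, count, check)).1
        ++ (if 1 < (ts.foldl pvStep2 (res, count, check)).2.1
            then PySem.Int.toChars (ts.foldl pvStep2 (res, count, check)).2.1 else [])
        ++ (ts.foldl pvStep2 (res, count, check)).2.2).length : Int)
      = (res.length : Int) + pvCost check (count + (pvRunLen check ts : Int))
        + pvRunCosts (ts.drop (pvRunLen check ts)) := by
  induction ts with
  | nil =>
      intro res check count hc
      simp only [List.foldl_nil, pvRunLen, List.drop_nil, pvRunCosts_nil, pvCost,
        List.length_append]
      push_cast
      simp only [add_zero]
      split_ifs <;> (try rw [List.length_nil]) <;> push_cast <;> ring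
  | cons t ts ih =>
      intro res check count hc
      by_cases h : check = t
      · subst h
        have hstep : pvStep2 (res, count, check) check = (res, count + 1, check) := by
          simp [pvStep2]
        have hrl : pvRunLen check (check :: ts) = pvRunLen check ts + 1 := by
          simp [pvRunLen]
        rw [List.foldl_cons, hstep, hrl, List.drop_succ_cons,
          ih res check (count + 1) (by omega)]
        push_cast
        ring
      · have hstep : pvStep2 (res, count, check)
            t = (res ++ (if 1 < count then PySem.Int.toChars count else []) ++ check, 1, t) := by
          simp [pvStep2, h]
        have hrl : pvRunLen check (t :: ts) = 0 := by
          rw [pvRunLen, if_neg (fun he : t = check => h he.symm)]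
        rw [List.foldl_cons, hstep, hrl, List.drop_zero,
          ih _ t 1 le_rfl, pvRunCosts_cons]
        simp only [pvCost, List.length_append]
        push_cast
        simp only [add_zero]
        split_ifs <;> (try rw [List.length_nil]) <;> push_cast <;> ring

-- splitting off the first element of a positive-step range
lemma pvRange_cons (a b s : Int) (hs : 0 < s) (hab : a < b) :
    PySem.List.pyRange a b s = a :: PySem.List.pyRange (a + s) b s := by
  rw [PySem.List.pyRange_of_pos a b hs, PySem.List.pyRange_of_pos (a + s) b hs]
  by_cases h2 : a + s < b
  · rw [if_pos hab, if_pos h2]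
    have hdiv : (b - a + s - 1) / s = (b - (a + s) + s - 1) / s + 1 := by
      have he : b - a + s - 1 = (b - (a + s) + s - 1) + 1 * s := by ring
      rw [he, Int.add_mul_ediv_right _ _ (by omega)]
    have hnn : (0 : Int) ≤ (b - (a + s) + s - 1) / s := Int.ediv_nonneg (by omega) (by omega)
    have hm : ((b - a + s - 1) / s).toNat = ((b - (a + s) + s - 1) / s).toNat + 1 := by omega
    rw [hm, List.range_succ_eq_map]
    simp only [List.map_cons, List.map_map, Nat.cast_zero, mul_zero, add_zero]
    congr 1
    apply List.map_congr_left
    intro k _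
    simp only [Function.comp_apply]
    push_cast
    ring
  · rw [if_pos hab, if_neg h2]
    have h1 : (b - a + s - 1) / s = 1 := by
      have hge : (1 : Int) ≤ (b - a + s - 1) / s := by
        rw [Int.le_ediv_iff_mul_le hs]; omega
      have hlt : (b - a + s - 1) / s < 2 := by
        rw [Int.ediv_lt_iff_lt_mul hs]; omega
      omega
    rw [h1]
    simp

-- per unit size: the length A's inner loop measures equals B's run-cost total over the chunks
lemma pvPerComp (cs : List Char) (comp : Int) (h1 : 1 ≤ comp) (h0 : 0 < (cs.length : Int)) :
    (let n : Int := (cs.length : Int)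
     let check := PySem.List.slice cs (some 0) (some comp)
     let st := (PySem.List.pyRange comp n comp).foldl (pvAStep cs comp) ([], 1, check)
     ((st.1 ++ (if 1 < st.2.1 then PySem.Int.toChars st.2.1 else []) ++ st.2.2).length : Int))
      = pvRunCosts ((PySem.List.pyRange 0 (cs.length : Int) comp).map
          (fun i => PySem.List.slice cs (some i) (some (i + comp)))) := by
  simp only
  rw [pvRange_cons 0 (cs.length : Int) comp (by omega) h0]
  simp only [List.map_cons, zero_add]
  set check := PySem.List.slice cs (some 0) (some comp) with hchk
  set ts := (PySem.List.pyRange comp (cs.length : Int) comp).map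
    (fun i => PySem.List.slice cs (some i) (some (i + comp))) with hts
  have hfold : (PySem.List.pyRange comp (cs.length : Int) comp).foldl (pvAStep cs comp)
      (([] : List Char), (1 : Int), check) = ts.foldl pvStep2 ([], 1, check) := by
    rw [hts, List.foldl_map]
    rfl
  rw [hfold, pvMain ts [] check 1 (le_refl 1), pvRunCosts_cons]
  simp

-- ===== VERDICT (by name: the statement is the Claim_ definition above) =====
theorem solution_spec : Claim_equal_solution := by
  unfold Claim_equal_solution
  intro s _
  unfold Spec_solution solution solution_alt
  simp only [PySem.Str.len_eq]
  apply PySem.List.foldl_congr_mem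
  intro acc comp hmem
  rw [PySem.List.mem_pyRange_one] at hmem
  have hlen : 0 < (s.toList.length : Int) := by
    have h2 : PySem.Int.floordiv (s.toList.length : Int) 2 = ((s.toList.length / 2 : Nat) : Int) := by
      exact_mod_cast PySem.Int.floordiv_natCast s.toList.length 2
    rw [h2] at hmem
    omega
  have := pvPerComp s.toList comp hmem.1 hlen
  simp only at this
  rw [this]
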